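-- pv_equiv track=rewrite | github.com/madhubandru/Text-based-search-engine | build_df.py | build_DF
-- ===== SOURCE A (Python) =====
-- def build_DF(N,processed_text,processed_bookname):
--
--     DF = {}
--
--     for i in range(N):
--         tokens = processed_text[i]
--         for w in tokens:
--             try:
--                 DF[w].add(i)
--             except:
--                 DF[w] = {i}
--
--         tokens = processed_bookname[i]
--         for w in tokens:
--             try:
--                 DF[w].add(i)
--             except:
--                 DF[w] = {i}
--     for i in DF:
--         DF[i] = len(DF[i])
--
--     total_vocab_size = len(DF)
--     total_vocab = [x for x in DF]
--
--     return DF, total_vocab_size, total_vocab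
-- ===== SOURCE B (Python) =====
-- def build_DF(N, processed_text, processed_bookname):
--     # Stage 1: materialize each document's combined token list.
--     docs = [processed_text[i] + processed_bookname[i] for i in range(N)]
--     # Stage 2: vocabulary in first-occurrence order over all documents.
--     vocab = list(dict.fromkeys(w for doc in docs for w in doc))
--     # Stage 3: per-word pass — DF[w] = number of documents containing w.
--     docsets = [set(doc) for doc in docs]
--     DF = {w: sum(1 for s in docsets if w in s) for w in vocab}
--     return DF, len(vocab), vocab
-- ===== Notes on version B (the rewrite author's own statement) =====
-- stated objective: alternative
-- what changed: B transposes the computation: instead of one pass over documents accumulating per-word sets of doc ids (then a second pass converting sets to sizes), B first builds the document list and the first-occurrence vocabulary, then for each vocabulary word counts the documents containing it (a per-word scan over per-document sets).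
import Mathlib
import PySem

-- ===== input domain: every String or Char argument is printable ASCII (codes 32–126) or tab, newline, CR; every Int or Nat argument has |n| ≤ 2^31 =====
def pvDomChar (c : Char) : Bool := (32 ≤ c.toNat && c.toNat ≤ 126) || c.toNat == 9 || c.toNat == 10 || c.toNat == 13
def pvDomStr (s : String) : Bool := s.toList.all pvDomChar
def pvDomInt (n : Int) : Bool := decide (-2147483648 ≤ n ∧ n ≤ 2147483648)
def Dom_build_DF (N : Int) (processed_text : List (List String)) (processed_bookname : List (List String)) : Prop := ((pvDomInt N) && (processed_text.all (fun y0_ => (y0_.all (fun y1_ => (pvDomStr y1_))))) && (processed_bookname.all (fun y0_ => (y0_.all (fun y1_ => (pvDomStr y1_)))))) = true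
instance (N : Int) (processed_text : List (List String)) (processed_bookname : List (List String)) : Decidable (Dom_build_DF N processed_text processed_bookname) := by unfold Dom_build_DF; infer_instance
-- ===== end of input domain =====

-- B transposes the computation: documents and vocabulary are materialized first, then each
-- vocabulary word's frequency is counted by a per-word scan over the documents, replacing A's
-- per-document accumulation of id-sets and its final set-to-size pass; objective: alternative.

-- ===== PORT A =====
-- 'try: DF[w].add(i) / except: DF[w] = {i}'
def pvAddTok (i : Int) (d : PySem.Dict String (PySem.Set Int)) (w : String) : PySem.Dict String (PySem.Set Int) :=
  match d.get? w with
  | some s => d.insert w (PySem.Set.add s i)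
  | none   => d.insert w (PySem.Set.ofList [i])

def build_DF (N : Int) (processed_text : List (List String)) (processed_bookname : List (List String)) : (List (String × Int)) × Int × List String :=
  let df := (PySem.List.pyRange 0 N 1).foldl (fun d i =>
      let d := ((PySem.List.pyGet? processed_text i).getD []).foldl (pvAddTok i) d
      ((PySem.List.pyGet? processed_bookname i).getD []).foldl (pvAddTok i) d)
    PySem.Dict.empty
  -- 'for i in DF: DF[i] = len(DF[i])': replaces each value by its length, keys and order unchanged
  let df2 : PySem.Dict String Int := PySem.Dict.mk (df.items.map (fun p => (p.1, (p.2.length : Int))))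
  let total_vocab_size : Int := df2.size
  let total_vocab := df2.keys
  (df2.items, total_vocab_size, total_vocab)

-- ===== PORT B =====
def build_DF_alt (N : Int) (processed_text : List (List String)) (processed_bookname : List (List String)) : (List (String × Int)) × Int × List String :=
  -- docs = [processed_text[i] + processed_bookname[i] for i in range(N)]
  let docs := (PySem.List.pyRange 0 N 1).map (fun i =>
      ((PySem.List.pyGet? processed_text i).getD []) ++ ((PySem.List.pyGet? processed_bookname i).getD []))
  -- vocab = list(dict.fromkeys(w for doc in docs for w in doc))
  let vocab := PySem.List.dedup (docs.flatMap (fun doc => doc))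
  -- docsets = [set(doc) for doc in docs]
  let docsets := docs.map PySem.Set.ofList
  -- DF = {w: sum(1 for s in docsets if w in s) for w in vocab}   ('sum' ported as countP cast to Int)
  let DF := vocab.map (fun w => (w, (docsets.countP (fun s => decide (w ∈ s)) : Int)))
  (DF, (vocab.length : Int), vocab)

-- ===== PRECONDITION & SPEC =====
-- A raises IndexError iff some i in range(N) is out of range of processed_text or processed_bookname.
def Pre_build_DF (N : Int) (processed_text : List (List String)) (processed_bookname : List (List String)) : Prop :=
  N ≤ (processed_text.length : Int) ∧ N ≤ (processed_bookname.length : Int)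
instance (N : Int) (processed_text : List (List String)) (processed_bookname : List (List String)) : Decidable (Pre_build_DF N processed_text processed_bookname) := by unfold Pre_build_DF; infer_instance

def pvWitness_build_DF : Int × List (List String) × List (List String) :=
  (2, ([["a", "b", "a"], ["b"]], [["t1"], ["a", "t2"]]))

def Spec_build_DF (N : Int) (processed_text : List (List String)) (processed_bookname : List (List String)) (out : (List (String × Int)) × Int × List String) : Prop := out = build_DF_alt N processed_text processed_bookname
instance (N : Int) (processed_text : List (List String)) (processed_bookname : List (List String)) (out : (List (String × Int)) × Int × List String) : Decidable (Spec_build_DF N processed_text processed_bookname out) := by unfold Spec_build_DF; infer_instance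

-- ===== CLAIM (what is proved, stated in full; the proofs are below) =====
def Claim_equal_build_DF : Prop := ∀ (N : Int) (processed_text : List (List String)) (processed_bookname : List (List String)), Dom_build_DF N processed_text processed_bookname → Pre_build_DF N processed_text processed_bookname → Spec_build_DF N processed_text processed_bookname (build_DF N processed_text processed_bookname)

-- ===== LEMMAS AND PROOFS =====

-- GHOST intermediate (proof only, used by neither port): the per-document counter dict.
def pvIncr (d : PySem.Dict String Int) (w : String) : PySem.Dict String Int :=
  d.insert w (d.getD w 0 + 1)

def pvGhost (ds : List (List String)) : PySem.Dict String Int :=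
  ds.foldl (fun d ts => (PySem.List.dedup ts).foldl pvIncr d) PySem.Dict.empty

-- B's spec functions
def pvVocab (ds : List (List String)) : List String := PySem.List.dedup (ds.flatMap (fun doc => doc))
def pvCnt (ds : List (List String)) (w : String) : Int := (ds.countP (fun d => decide (w ∈ d)) : Int)

-- the value pvAddTok stores, exposing the common 'insert' shape
def pvNewVal (i : Int) (d : PySem.Dict String (PySem.Set Int)) (w : String) : PySem.Set Int :=
  match d.get? w with
  | some s => PySem.Set.add s i
  | none   => PySem.Set.ofList [i]

theorem pvAddTok_eq_insert (i : Int) (d : PySem.Dict String (PySem.Set Int)) (w : String) :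
    pvAddTok i d w = d.insert w (pvNewVal i d w) := by
  unfold pvAddTok pvNewVal
  cases d.get? w <;> rfl

-- i occurs in a stored set only as its last element
def pvOk (i : Int) (d : PySem.Dict String (PySem.Set Int)) : Prop :=
  ∀ w s, d.get? w = some s → i ∈ s → ∃ s0, s = s0 ++ [i] ∧ i ∉ s0

theorem pvOk_step (i : Int) (d : PySem.Dict String (PySem.Set Int)) (t : String)
    (h : pvOk i d) : pvOk i (pvAddTok i d t) := by
  intro w s hget hi
  unfold pvAddTok at hget
  rcases hd : d.get? t with _ | s0 <;> rw [hd] at hget <;>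
    rw [PySem.Dict.get?_insert] at hget <;> split_ifs at hget with hw
  · cases hget
    exact ⟨[], rfl, by simp⟩
  · exact h w s hget hi
  · cases hget
    by_cases hmem : i ∈ s0
    · rw [PySem.Set.add_of_mem hmem] at hi ⊢
      exact h t s0 hd hi
    · rw [PySem.Set.add_of_not_mem hmem]
      exact ⟨s0, rfl, hmem⟩
  · exact h w s hget hi

-- what A's inner token loop does to each key
theorem pvInnerA (i : Int) (ts : List String) :
    ∀ (d : PySem.Dict String (PySem.Set Int)), pvOk i d →
    ∀ w, (ts.foldl (pvAddTok i) d).get? w =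
      if w ∈ ts then
        some (match d.get? w with
              | none => [i]
              | some s => if i ∈ s then s else s ++ [i])
      else d.get? w := by
  induction ts with
  | nil => intro d _ w; simp
  | cons t rest ih =>
    intro d hok w
    have hok' := pvOk_step i d t hok
    have hstep := ih (pvAddTok i d t) hok' w
    simp only [List.foldl_cons] at *
    rw [hstep]
    by_cases hwt : w = t
    · subst hwt
      have hself : (pvAddTok i d w).get? w =
          some (match d.get? w with
                | none => [i]
                | some s => if i ∈ s then s else s ++ [i]) := by
        unfold pvAddTok
        rcases hd : d.get? w with _ | s0
        · simp [PySem.Dict.get?_insert_self]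
          rfl
        · simp [PySem.Dict.get?_insert_self, PySem.Set.add_eq_ite]
      have hiMem : i ∈ (match d.get? w with
                | none => ([i] : PySem.Set Int)
                | some s => if i ∈ s then s else s ++ [i]) := by
        rcases d.get? w with _ | s0
        · simp
        · by_cases h1 : i ∈ s0 <;> simp [h1]
      by_cases hwr : w ∈ rest <;> simp [hwr, hself, hiMem]
    · have hne : (pvAddTok i d t).get? w = d.get? w := by
        unfold pvAddTok
        rcases d.get? t <;> rw [PySem.Dict.get?_insert_of_ne _ _ hwt]
      rw [hne]
      by_cases hwr : w ∈ rest <;> simp [hwr, hwt]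

-- the coupling invariant between A's dict of id-sets and the ghost counter after the first i documents
def pvR (i : Int) (dA : PySem.Dict String (PySem.Set Int)) (dB : PySem.Dict String Int) : Prop :=
  dA.keys.Nodup ∧ (∀ p ∈ dA.items, ∀ j ∈ p.2, j < i) ∧
  dA.items.map (fun p => (p.1, (p.2.length : Int))) = dB.items

theorem pvDocStep (i : Int) (ts : List String) (dA : PySem.Dict String (PySem.Set Int))
    (dB : PySem.Dict String Int) (hR : pvR i dA dB) :
    pvR (i + 1) (ts.foldl (pvAddTok i) dA) ((PySem.List.dedup ts).foldl pvIncr dB) := by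
  obtain ⟨hnd, hbound, hitems⟩ := hR
  have hfresh : ∀ w s, dA.get? w = some s → i ∉ s := by
    intro w s hg hi
    exact absurd (hbound (w, s) (PySem.Dict.mem_items_of_get?_eq_some _ hg) i hi) (lt_irrefl i)
  have hok : pvOk i dA := fun w s hg hi => absurd hi (hfresh w s hg)
  have hA : ∀ w, (ts.foldl (pvAddTok i) dA).get? w =
      if w ∈ ts then some (((dA.get? w).getD []) ++ [i]) else dA.get? w := by
    intro w
    rw [pvInnerA i ts dA hok w]
    rcases hg : dA.get? w with _ | s
    · simp
    · simp [hfresh w s hg]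
  have hAfold : ts.foldl (pvAddTok i) dA
      = ts.foldl (fun d x => d.insert x (pvNewVal i d x)) dA :=
    PySem.List.foldl_congr_mem ts _ _ dA (fun acc x _ => pvAddTok_eq_insert i acc x)
  have hBfold : List.foldl pvIncr dB (PySem.List.dedup ts)
      = (PySem.List.dedup ts).foldl (fun d x => d.insert x (d.getD x 0 + 1)) dB := rfl
  have hndA' : (ts.foldl (pvAddTok i) dA).keys.Nodup := by
    rw [hAfold]; exact PySem.Dict.nodup_keys_foldl_insert ts _ dA hnd
  have hkeysA' : (ts.foldl (pvAddTok i) dA).keys = PySem.Set.update dA.keys ts := by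
    rw [hAfold]; exact PySem.Dict.keys_foldl_insert ts _ dA
  have hkeysB : dB.keys = dA.keys := by
    simp only [PySem.Dict.keys, ← hitems, List.map_map]
    rfl
  have hndB : dB.keys.Nodup := by rw [hkeysB]; exact hnd
  have hndB' : ((PySem.List.dedup ts).foldl pvIncr dB).keys.Nodup := by
    rw [hBfold]; exact PySem.Dict.nodup_keys_foldl_insert _ _ dB hndB
  have hkeysB' : ((PySem.List.dedup ts).foldl pvIncr dB).keys = PySem.Set.update dA.keys ts := by
    rw [hBfold, PySem.Dict.keys_foldl_insert, hkeysB]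
    rw [PySem.Set.update_eq_append_filter, PySem.Set.update_eq_append_filter]
    simp [PySem.Set.ofList_ofList]
  have hvalB : ∀ w, ((PySem.List.dedup ts).foldl pvIncr dB).getD w 0
      = dB.getD w 0 + ((PySem.List.dedup ts).count w : Int) := by
    intro w; rw [hBfold]; exact PySem.Dict.getD_foldl_insert_add_one _ dB w
  have hcnt : ∀ w, ((PySem.List.dedup ts).count w : Int) = if w ∈ ts then 1 else 0 := by
    intro w
    by_cases hw : w ∈ ts
    · rw [List.count_eq_one_of_mem (PySem.List.nodup_dedup ts) (by simpa [PySem.List.mem_dedup] using hw)]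
      simp [hw]
    · rw [List.count_eq_zero_of_not_mem (by simpa [PySem.List.mem_dedup] using hw)]
      simp [hw]
  have hv0 : ∀ w, dB.getD w 0 = (((dA.get? w).getD []).length : Int) := by
    intro w
    rcases hg : dA.get? w with _ | s
    · have hwk : w ∉ dA.keys := by
        rw [← PySem.Dict.get?_eq_none_iff_not_mem_keys dA w]; exact hg
      have : dB.contains w = false := by
        rw [PySem.Dict.contains_eq_decide_mem_keys, hkeysB]; simpa using hwk
      simp [PySem.Dict.getD_of_not_contains dB (0 : Int) this]
    · have hmem : (w, (s.length : Int)) ∈ dB.items := by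
        rw [← hitems]
        exact List.mem_map_of_mem (PySem.Dict.mem_items_of_get?_eq_some _ hg)
      simpa using PySem.Dict.getD_of_mem_items dB hmem hndB 0
  refine ⟨hndA', ?_, ?_⟩
  · intro p hp j hj
    have hg' : (ts.foldl (pvAddTok i) dA).get? p.1 = some p.2 :=
      PySem.Dict.get?_of_mem_items _ hp hndA'
    rw [hA p.1] at hg'
    by_cases hw : p.1 ∈ ts
    · rw [if_pos hw] at hg'
      have hp2 : p.2 = ((dA.get? p.1).getD []) ++ [i] := by
        exact (Option.some.inj hg').symm
      rw [hp2] at hj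
      rcases List.mem_append.mp hj with hj | hj
      · rcases hg : dA.get? p.1 with _ | s
        · rw [hg] at hj; simp at hj
        · rw [hg] at hj
          exact lt_trans (hbound (p.1, s) (PySem.Dict.mem_items_of_get?_eq_some _ hg) j hj) (by omega)
      · simp at hj; omega
    · rw [if_neg hw] at hg'
      exact lt_trans (hbound (p.1, p.2) (by
        have := PySem.Dict.mem_items_of_get?_eq_some _ hg'
        simpa using this) j hj) (by omega)
  · rw [PySem.Dict.items_eq_map_keys _ hndA' ([] : PySem.Set Int),
        PySem.Dict.items_eq_map_keys _ hndB' (0 : Int), hkeysA', hkeysB', List.map_map]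
    apply List.map_congr_left
    intro k hk
    simp only [Function.comp]
    refine congrArg (Prod.mk k) ?_
    rw [PySem.Dict.getD_eq_get?_getD, hA k, hvalB k, hcnt k, hv0 k]
    by_cases hw : k ∈ ts <;> simp [hw]

theorem pvMainLoop (pt pb : List (List String)) (n : Nat) :
    pvR (n : Int)
      (((List.range n).map (fun (k : Nat) => (k : Int))).foldl (fun d i =>
        ((PySem.List.pyGet? pb i).getD []).foldl (pvAddTok i)
          (((PySem.List.pyGet? pt i).getD []).foldl (pvAddTok i) d)) PySem.Dict.empty)
      (pvGhost (((List.range n).map (fun (k : Nat) => (k : Int))).map (fun i =>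
        ((PySem.List.pyGet? pt i).getD []) ++ ((PySem.List.pyGet? pb i).getD [])))) := by
  induction n with
  | zero =>
    refine ⟨by simp [PySem.Dict.empty], ?_, rfl⟩
    intro p hp
    cases hp
  | succ n ih =>
    have hsplit : (List.range (n + 1)).map (fun (k : Nat) => (k : Int))
        = (List.range n).map (fun (k : Nat) => (k : Int)) ++ [(n : Int)] := by
      rw [List.range_succ, List.map_append]; rfl
    rw [hsplit, List.foldl_append, List.map_append]
    unfold pvGhost
    rw [List.foldl_append]
    simp only [List.foldl_cons, List.foldl_nil, List.map_cons, List.map_nil]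
    have step := pvDocStep (n : Int)
      (((PySem.List.pyGet? pt (n : Int)).getD []) ++ ((PySem.List.pyGet? pb (n : Int)).getD [])) _ _ ih
    rw [List.foldl_append] at step
    have hcast : ((n : Int) + 1) = ((n + 1 : Nat) : Int) := by push_cast; ring
    rw [hcast] at step
    exact step

-- the ghost counter's items ARE B's vocabulary map
theorem pvGhostItems (ds : List (List String)) :
    (pvGhost ds).keys.Nodup ∧
    (pvGhost ds).items = (pvVocab ds).map (fun w => (w, pvCnt ds w)) := by
  induction ds using List.reverseRecOn with
  | nil => exact ⟨by decide, rfl⟩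
  | append_singleton ds t ih =>
    obtain ⟨hnd, hitems⟩ := ih
    have hfold : pvGhost (ds ++ [t])
        = (PySem.List.dedup t).foldl (fun d x => d.insert x (d.getD x 0 + 1)) (pvGhost ds) := by
      unfold pvGhost
      rw [List.foldl_append]
      rfl
    have hkeys : (pvGhost ds).keys = pvVocab ds := by
      simp only [PySem.Dict.keys, hitems, List.map_map]
      exact List.map_id _
    have hnd' : (pvGhost (ds ++ [t])).keys.Nodup := by
      rw [hfold]; exact PySem.Dict.nodup_keys_foldl_insert _ _ _ hnd
    have hvocab : pvVocab (ds ++ [t]) = PySem.Set.update (pvVocab ds) t := by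
      unfold pvVocab
      simp only [PySem.List.dedup_eq_ofList, List.flatMap_append, List.flatMap_cons,
        List.flatMap_nil, List.append_nil]
      exact PySem.Set.ofList_append _ _
    have hkeys' : (pvGhost (ds ++ [t])).keys = pvVocab (ds ++ [t]) := by
      rw [hfold, PySem.Dict.keys_foldl_insert, hkeys, hvocab]
      rw [PySem.Set.update_eq_append_filter, PySem.Set.update_eq_append_filter]
      simp [PySem.Set.ofList_ofList]
    have hcnt : ∀ w, ((PySem.List.dedup t).count w : Int) = if w ∈ t then 1 else 0 := by
      intro w
      by_cases hw : w ∈ t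
      · rw [List.count_eq_one_of_mem (PySem.List.nodup_dedup t) (by simpa [PySem.List.mem_dedup] using hw)]
        simp [hw]
      · rw [List.count_eq_zero_of_not_mem (by simpa [PySem.List.mem_dedup] using hw)]
        simp [hw]
    have hgetD : ∀ w, (pvGhost ds).getD w 0 = pvCnt ds w := by
      intro w
      by_cases hw : w ∈ pvVocab ds
      · have hmem : (w, pvCnt ds w) ∈ (pvGhost ds).items := by
          rw [hitems]; exact List.mem_map_of_mem hw
        exact PySem.Dict.getD_of_mem_items _ hmem hnd 0
      · have hc : (pvGhost ds).contains w = false := by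
          rw [PySem.Dict.contains_eq_decide_mem_keys, hkeys]; simpa using hw
        have h0 : pvCnt ds w = 0 := by
          unfold pvCnt
          have : ds.countP (fun d => decide (w ∈ d)) = 0 := by
            rw [List.countP_eq_zero]
            intro d hd
            simp only [decide_eq_true_eq]
            intro hwd
            exact hw (by simp [pvVocab]; exact ⟨d, hd, hwd⟩)
          simp [this]
        rw [PySem.Dict.getD_of_not_contains _ (0 : Int) hc, h0]
    refine ⟨hnd', ?_⟩
    rw [PySem.Dict.items_eq_map_keys _ hnd' (0 : Int), hkeys']
    apply List.map_congr_left
    intro k hk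
    refine congrArg (Prod.mk k) ?_
    rw [hfold, PySem.Dict.getD_foldl_insert_add_one, hgetD k, hcnt k]
    unfold pvCnt
    rw [List.countP_append]
    by_cases hw : k ∈ t <;> simp [hw]

theorem pvFinal (N : Int) (pt pb : List (List String)) :
    build_DF N pt pb = build_DF_alt N pt pb := by
  by_cases hN : N ≤ 0
  · simp [build_DF, build_DF_alt, PySem.List.pyRange_one_eq_nil hN, PySem.Dict.empty]
  · have hrange : PySem.List.pyRange 0 N 1 = (List.range N.toNat).map (fun (k : Nat) => (k : Int)) := by
      rw [PySem.List.pyRange_one]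
      norm_num
    obtain ⟨_, _, hitemsR⟩ := pvMainLoop pt pb N.toNat
    set ks := (List.range N.toNat).map (fun (k : Nat) => (k : Int)) with hks
    set docs := ks.map (fun i =>
      ((PySem.List.pyGet? pt i).getD []) ++ ((PySem.List.pyGet? pb i).getD [])) with hdocs
    obtain ⟨_, hghost⟩ := pvGhostItems docs
    -- B's countP over doc-sets is pvCnt over docs
    have hsets : (fun w => (w, ((docs.map PySem.Set.ofList).countP (fun s => decide (w ∈ s)) : Int)))
        = (fun w => (w, pvCnt docs w)) := by
      funext w
      refine congrArg (Prod.mk w) ?_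
      unfold pvCnt
      rw [List.countP_map]
      congr 1
      apply List.countP_congr
      intro d _
      simp [Function.comp, PySem.Set.mem_ofList]
    have hB : build_DF_alt N pt pb
        = ((pvVocab docs).map (fun w => (w, pvCnt docs w)), ((pvVocab docs).length : Int), pvVocab docs) := by
      simp only [build_DF_alt, hrange, ← hdocs, hsets]
      rfl
    have hA : build_DF N pt pb
        = ((pvGhost docs).items, (((pvGhost docs).items.length : Nat) : Int), (pvGhost docs).items.map Prod.fst) := by
      simp only [build_DF, hrange, PySem.Dict.size, PySem.Dict.keys]
      rw [← hitemsR]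
    rw [hA, hB, hghost]
    refine Prod.ext ?_ (Prod.ext (by simp) ?_)
    · rfl
    · rw [List.map_map]
      exact List.map_id _

-- ===== VERDICT (by name: the statement is the Claim_ definition above) =====
theorem build_DF_spec : Claim_equal_build_DF := by
  intro N pt pb _ _
  unfold Spec_build_DF
  exact pvFinal N pt pb
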